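-- pv_equiv track=rewrite | github.com/Pendigard/codeLLM-SAE | src/code_dataset.py | simplify_token_type
-- ===== SOURCE A (Python) =====
-- from typing import Any, Dict, Iterable, List, Optional, Sequence, Tuple
--
-- def simplify_token_type(token_type: Any) -> str:
--     token_str = str(token_type)
--     mapping = {
--         "Token.Keyword": "keyword",
--         "Token.Name.Function": "function",
--         "Token.Name.Class": "class",
--         "Token.Name.Namespace": "namespace",
--         "Token.Name.Builtin": "builtin",
--         "Token.Name.Decorator": "decorator",
--         "Token.Name.Variable": "variable",
--         "Token.Name": "name",
--         "Token.Literal.String": "string",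
--         "Token.Literal.Number": "number",
--         "Token.Operator": "operator",
--         "Token.Punctuation": "punctuation",
--         "Token.Comment": "comment",
--         "Token.Text.Whitespace": "whitespace",
--         "Token.Text": "text",
--     }
--
--     for key in sorted(mapping.keys(), key=len, reverse=True):
--         if token_str.startswith(key):
--             return mapping[key]
--
--     return "other"
-- ===== SOURCE B (Python) =====
-- from typing import Any
--
-- def simplify_token_type(token_type: Any) -> str:
--     token_str = str(token_type)
--     mapping = {
--         "Token.Keyword": "keyword",
--         "Token.Name.Function": "function",
--         "Token.Name.Class": "class",
--         "Token.Name.Namespace": "namespace",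
--         "Token.Name.Builtin": "builtin",
--         "Token.Name.Decorator": "decorator",
--         "Token.Name.Variable": "variable",
--         "Token.Name": "name",
--         "Token.Literal.String": "string",
--         "Token.Literal.Number": "number",
--         "Token.Operator": "operator",
--         "Token.Punctuation": "punctuation",
--         "Token.Comment": "comment",
--         "Token.Text.Whitespace": "whitespace",
--         "Token.Text": "text",
--     }
--     best_value = None
--     best_len = -1
--     for key, value in mapping.items():
--         if len(key) > best_len and token_str.startswith(key):
--             best_value = value
--             best_len = len(key)
--     return best_value if best_value is not None else "other"
-- ===== Notes on version B (the rewrite author's own statement) =====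
-- stated objective: simpler
-- what changed: Replaces A's per-call sort of the keys followed by a first-match scan with a single unsorted pass over mapping.items() that keeps the value of the longest matching key (strict-improvement update), returning it or 'other'.
import Mathlib
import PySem

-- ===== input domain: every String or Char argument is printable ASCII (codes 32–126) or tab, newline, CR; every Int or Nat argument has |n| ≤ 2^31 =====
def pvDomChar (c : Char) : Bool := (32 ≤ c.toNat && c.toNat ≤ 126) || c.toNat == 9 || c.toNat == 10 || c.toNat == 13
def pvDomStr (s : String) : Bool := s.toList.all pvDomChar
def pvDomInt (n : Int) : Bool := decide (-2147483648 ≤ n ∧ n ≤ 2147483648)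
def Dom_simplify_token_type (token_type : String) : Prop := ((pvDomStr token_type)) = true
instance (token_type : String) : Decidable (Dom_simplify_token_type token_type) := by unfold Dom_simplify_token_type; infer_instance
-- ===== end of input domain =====

-- B replaces A's per-call sort-then-first-match scan by a single unsorted pass over the mapping
-- keeping the longest matching key's value (objective: simpler — no sort, one loop).
-- (str(token_type) is the identity here: the argument is already a string.)

-- the shared mapping literal (identical in both Pythons)
def pvMapping : PySem.Dict String String := PySem.Dict.ofList
  [ ("Token.Keyword", "keyword")
  , ("Token.Name.Function", "function")
  , ("Token.Name.Class", "class")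
  , ("Token.Name.Namespace", "namespace")
  , ("Token.Name.Builtin", "builtin")
  , ("Token.Name.Decorator", "decorator")
  , ("Token.Name.Variable", "variable")
  , ("Token.Name", "name")
  , ("Token.Literal.String", "string")
  , ("Token.Literal.Number", "number")
  , ("Token.Operator", "operator")
  , ("Token.Punctuation", "punctuation")
  , ("Token.Comment", "comment")
  , ("Token.Text.Whitespace", "whitespace")
  , ("Token.Text", "text") ]

-- ===== PORT A =====
-- 'for key in sorted(mapping.keys(), key=len, reverse=True): if token_str.startswith(key): return mapping[key]'
-- mapping[key] is ported as getD with default "other": the key comes from mapping.keys(),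
-- so the lookup always succeeds and the default is unreachable.
def pvScanA (token_str : String) : List String → String
  | [] => "other"
  | k :: rest =>
      if PySem.Str.startswith token_str k then PySem.Dict.getD pvMapping k "other"
      else pvScanA token_str rest

def simplify_token_type (token_type : String) : String :=
  pvScanA token_type
    (PySem.List.sorted (PySem.Dict.keys pvMapping) (fun k => PySem.Str.len k) true)

-- ===== PORT B =====
-- one pass over mapping.items(): state (best_value, best_len), update when
-- len(key) > best_len and token_str.startswith(key)
def pvStepB (token_str : String) (st : Option String × Int) (kv : String × String) :
    Option String × Int :=
  if decide (st.2 < (PySem.Str.len kv.1 : Int)) && PySem.Str.startswith token_str kv.1 then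
    (some kv.2, (PySem.Str.len kv.1 : Int))
  else st

def simplify_token_type_alt (token_type : String) : String :=
  match ((PySem.Dict.items pvMapping).foldl (pvStepB token_type) (none, -1)).1 with
  | some v => v
  | none => "other"

-- ===== PRECONDITION & SPEC =====
def Spec_simplify_token_type (token_type : String) (out : String) : Prop := out = simplify_token_type_alt token_type
instance (token_type : String) (out : String) : Decidable (Spec_simplify_token_type token_type out) := by unfold Spec_simplify_token_type; infer_instance

-- ===== CLAIM (what is proved, stated in full; the proofs are below) =====
def Claim_equal_simplify_token_type : Prop := ∀ (token_type : String), Dom_simplify_token_type token_type → Spec_simplify_token_type token_type (simplify_token_type token_type)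

-- ===== LEMMAS AND PROOFS =====

-- Both results depend on token_type only through the 15 booleans "token_str starts with key i"
-- (numbered 1..15 in the mapping's insertion order).  hA abstracts A's if-chain (in A's sorted
-- order, ties kept in insertion order by Python's stable reverse sort), hB abstracts B's fold;
-- both return the INDEX of the chosen key (0 = none), and hA = hB is decided over all 2^15
-- boolean vectors.  pvIdxVal/pvOut map an index back to the mapped value.

def pvIdxVal : Nat → Option String
  | 1 => some "keyword"   | 2 => some "function"  | 3 => some "class"
  | 4 => some "namespace" | 5 => some "builtin"   | 6 => some "decorator"
  | 7 => some "variable"  | 8 => some "name"      | 9 => some "string"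
  | 10 => some "number"   | 11 => some "operator" | 12 => some "punctuation"
  | 13 => some "comment"  | 14 => some "whitespace" | 15 => some "text"
  | _ => none

def pvOut (n : Nat) : String :=
  match pvIdxVal n with
  | some v => v
  | none => "other"

def hA (b1 b2 b3 b4 b5 b6 b7 b8 b9 b10 b11 b12 b13 b14 b15 : Bool) : Nat :=
  if b14 then 14 else if b4 then 4 else if b6 then 6
  else if b9 then 9 else if b10 then 10 else if b2 then 2
  else if b7 then 7 else if b5 then 5 else if b12 then 12
  else if b3 then 3 else if b11 then 11 else if b1 then 1
  else if b13 then 13 else if b8 then 8 else if b15 then 15 else 0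

def hStep (b : Bool) (l : Int) (i : Nat) (st : Nat × Int) : Nat × Int :=
  if decide (st.2 < l) && b then (i, l) else st

def hB (b1 b2 b3 b4 b5 b6 b7 b8 b9 b10 b11 b12 b13 b14 b15 : Bool) : Nat :=
  (hStep b15 10 15 (hStep b14 21 14 (hStep b13 13 13
        (hStep b12 17 12 (hStep b11 14 11 (hStep b10 20 10
        (hStep b9 20 9 (hStep b8 10 8 (hStep b7 19 7
        (hStep b6 20 6 (hStep b5 18 5 (hStep b4 20 4
        (hStep b3 16 3 (hStep b2 19 2 (hStep b1 13 1
        ((0, -1) : Nat × Int)))))))))))))))).1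

set_option maxHeartbeats 1000000 in
theorem sortedKeys_eq :
    PySem.List.sorted (PySem.Dict.keys pvMapping) (fun k => PySem.Str.len k) true =
    [ "Token.Text.Whitespace", "Token.Name.Namespace", "Token.Name.Decorator"
    , "Token.Literal.String", "Token.Literal.Number", "Token.Name.Function"
    , "Token.Name.Variable", "Token.Name.Builtin", "Token.Punctuation"
    , "Token.Name.Class", "Token.Operator", "Token.Keyword", "Token.Comment"
    , "Token.Name", "Token.Text" ] := by decide

set_option maxHeartbeats 1000000 in
theorem items_eq :
    PySem.Dict.items pvMapping =
    [ ("Token.Keyword", "keyword"), ("Token.Name.Function", "function")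
    , ("Token.Name.Class", "class"), ("Token.Name.Namespace", "namespace")
    , ("Token.Name.Builtin", "builtin"), ("Token.Name.Decorator", "decorator")
    , ("Token.Name.Variable", "variable"), ("Token.Name", "name")
    , ("Token.Literal.String", "string"), ("Token.Literal.Number", "number")
    , ("Token.Operator", "operator"), ("Token.Punctuation", "punctuation")
    , ("Token.Comment", "comment"), ("Token.Text.Whitespace", "whitespace")
    , ("Token.Text", "text") ] := by decide

set_option maxRecDepth 8192 in
set_option maxHeartbeats 1000000 in
theorem A_eq_hA (t : String) :
    simplify_token_type t = pvOut (hA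
      (PySem.Str.startswith t "Token.Keyword") (PySem.Str.startswith t "Token.Name.Function")
      (PySem.Str.startswith t "Token.Name.Class") (PySem.Str.startswith t "Token.Name.Namespace")
      (PySem.Str.startswith t "Token.Name.Builtin") (PySem.Str.startswith t "Token.Name.Decorator")
      (PySem.Str.startswith t "Token.Name.Variable") (PySem.Str.startswith t "Token.Name")
      (PySem.Str.startswith t "Token.Literal.String") (PySem.Str.startswith t "Token.Literal.Number")
      (PySem.Str.startswith t "Token.Operator") (PySem.Str.startswith t "Token.Punctuation")
      (PySem.Str.startswith t "Token.Comment") (PySem.Str.startswith t "Token.Text.Whitespace")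
      (PySem.Str.startswith t "Token.Text")) := by
  unfold simplify_token_type
  rw [sortedKeys_eq]
  simp only [pvScanA, hA]
  cases _h0 : PySem.Str.startswith t "Token.Text.Whitespace" with
  | true => simp only [reduceIte]; decide
  | false =>
    simp only [Bool.false_eq_true, reduceIte]
    cases _h1 : PySem.Str.startswith t "Token.Name.Namespace" with
    | true => simp only [reduceIte]; decide
    | false =>
      simp only [Bool.false_eq_true, reduceIte]
      cases _h2 : PySem.Str.startswith t "Token.Name.Decorator" with
      | true => simp only [reduceIte]; decide
      | false =>
        simp only [Bool.false_eq_true, reduceIte]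
        cases _h3 : PySem.Str.startswith t "Token.Literal.String" with
        | true => simp only [reduceIte]; decide
        | false =>
          simp only [Bool.false_eq_true, reduceIte]
          cases _h4 : PySem.Str.startswith t "Token.Literal.Number" with
          | true => simp only [reduceIte]; decide
          | false =>
            simp only [Bool.false_eq_true, reduceIte]
            cases _h5 : PySem.Str.startswith t "Token.Name.Function" with
            | true => simp only [reduceIte]; decide
            | false =>
              simp only [Bool.false_eq_true, reduceIte]
              cases _h6 : PySem.Str.startswith t "Token.Name.Variable" with
              | true => simp only [reduceIte]; decide
              | false =>
                simp only [Bool.false_eq_true, reduceIte]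
                cases _h7 : PySem.Str.startswith t "Token.Name.Builtin" with
                | true => simp only [reduceIte]; decide
                | false =>
                  simp only [Bool.false_eq_true, reduceIte]
                  cases _h8 : PySem.Str.startswith t "Token.Punctuation" with
                  | true => simp only [reduceIte]; decide
                  | false =>
                    simp only [Bool.false_eq_true, reduceIte]
                    cases _h9 : PySem.Str.startswith t "Token.Name.Class" with
                    | true => simp only [reduceIte]; decide
                    | false =>
                      simp only [Bool.false_eq_true, reduceIte]
                      cases _h10 : PySem.Str.startswith t "Token.Operator" with
                      | true => simp only [reduceIte]; decide
                      | false =>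
                        simp only [Bool.false_eq_true, reduceIte]
                        cases _h11 : PySem.Str.startswith t "Token.Keyword" with
                        | true => simp only [reduceIte]; decide
                        | false =>
                          simp only [Bool.false_eq_true, reduceIte]
                          cases _h12 : PySem.Str.startswith t "Token.Comment" with
                          | true => simp only [reduceIte]; decide
                          | false =>
                            simp only [Bool.false_eq_true, reduceIte]
                            cases _h13 : PySem.Str.startswith t "Token.Name" with
                            | true => simp only [reduceIte]; decide
                            | false =>
                              simp only [Bool.false_eq_true, reduceIte]
                              cases _h14 : PySem.Str.startswith t "Token.Text" with
                              | true => simp only [reduceIte]; decide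
                              | false =>
                                simp only [Bool.false_eq_true, reduceIte]
                                decide

-- invariant tying B's fold state (best value, best len) to the index-valued abstract state
def pvRel (s : Option String × Int) (n : Nat × Int) : Prop :=
  s.1 = pvIdxVal n.1 ∧ s.2 = n.2

theorem pvRel_step (t k v : String) (i : Nat) (l : Int)
    (hl : (PySem.Str.len k : Int) = l) (hv : pvIdxVal i = some v)
    (s : Option String × Int) (n : Nat × Int) (hr : pvRel s n) :
    pvRel (pvStepB t s (k, v)) (hStep (PySem.Str.startswith t k) l i n) := by
  obtain ⟨h1, h2⟩ := hr
  simp only [pvStepB, hStep, pvRel, hl, h2]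
  split
  · exact ⟨hv.symm, rfl⟩
  · exact ⟨h1, h2⟩

set_option maxRecDepth 8192 in
set_option maxHeartbeats 1000000 in
theorem B_eq_hB (t : String) :
    simplify_token_type_alt t = pvOut (hB
      (PySem.Str.startswith t "Token.Keyword") (PySem.Str.startswith t "Token.Name.Function")
      (PySem.Str.startswith t "Token.Name.Class") (PySem.Str.startswith t "Token.Name.Namespace")
      (PySem.Str.startswith t "Token.Name.Builtin") (PySem.Str.startswith t "Token.Name.Decorator")
      (PySem.Str.startswith t "Token.Name.Variable") (PySem.Str.startswith t "Token.Name")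
      (PySem.Str.startswith t "Token.Literal.String") (PySem.Str.startswith t "Token.Literal.Number")
      (PySem.Str.startswith t "Token.Operator") (PySem.Str.startswith t "Token.Punctuation")
      (PySem.Str.startswith t "Token.Comment") (PySem.Str.startswith t "Token.Text.Whitespace")
      (PySem.Str.startswith t "Token.Text")) := by
  unfold simplify_token_type_alt
  rw [items_eq]
  simp only [List.foldl, hB]
  have r0 : pvRel ((none, -1) : Option String × Int) ((0, -1) : Nat × Int) := ⟨rfl, rfl⟩
  have r1 := pvRel_step t "Token.Keyword" "keyword" 1 13 (by decide) rfl _ _ r0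
  have r2 := pvRel_step t "Token.Name.Function" "function" 2 19 (by decide) rfl _ _ r1
  have r3 := pvRel_step t "Token.Name.Class" "class" 3 16 (by decide) rfl _ _ r2
  have r4 := pvRel_step t "Token.Name.Namespace" "namespace" 4 20 (by decide) rfl _ _ r3
  have r5 := pvRel_step t "Token.Name.Builtin" "builtin" 5 18 (by decide) rfl _ _ r4
  have r6 := pvRel_step t "Token.Name.Decorator" "decorator" 6 20 (by decide) rfl _ _ r5
  have r7 := pvRel_step t "Token.Name.Variable" "variable" 7 19 (by decide) rfl _ _ r6
  have r8 := pvRel_step t "Token.Name" "name" 8 10 (by decide) rfl _ _ r7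
  have r9 := pvRel_step t "Token.Literal.String" "string" 9 20 (by decide) rfl _ _ r8
  have r10 := pvRel_step t "Token.Literal.Number" "number" 10 20 (by decide) rfl _ _ r9
  have r11 := pvRel_step t "Token.Operator" "operator" 11 14 (by decide) rfl _ _ r10
  have r12 := pvRel_step t "Token.Punctuation" "punctuation" 12 17 (by decide) rfl _ _ r11
  have r13 := pvRel_step t "Token.Comment" "comment" 13 13 (by decide) rfl _ _ r12
  have r14 := pvRel_step t "Token.Text.Whitespace" "whitespace" 14 21 (by decide) rfl _ _ r13
  have r15 := pvRel_step t "Token.Text" "text" 15 10 (by decide) rfl _ _ r14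
  rw [r15.1]
  rfl

set_option maxRecDepth 8192 in
set_option maxHeartbeats 2000000 in
theorem hA_eq_hB : ∀ b1 b2 b3 b4 b5 b6 b7 b8 b9 b10 b11 b12 b13 b14 b15 : Bool,
    hA b1 b2 b3 b4 b5 b6 b7 b8 b9 b10 b11 b12 b13 b14 b15 =
    hB b1 b2 b3 b4 b5 b6 b7 b8 b9 b10 b11 b12 b13 b14 b15 := by decide

-- ===== VERDICT (by name: the statement is the Claim_ definition above) =====
theorem simplify_token_type_spec : Claim_equal_simplify_token_type := by
  intro t _
  unfold Spec_simplify_token_type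
  rw [A_eq_hA, B_eq_hB, hA_eq_hB]
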